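-- pv_equiv track=rewrite | github.com/hanaKel/RA-1 | kratka predstavitev/abs_max_smaller_Sklad.py | maxEl
-- ===== SOURCE A (Python) =====
-- class Sklad:
--     def __init__(self):
--         self.podatki= []
--
--     def prazen(self):
--         return len(self.podatki) == 0
--
--     def vstavi(self, num):
--         self.podatki.append(num)
--
--     def odstrani(self):
--         if self.prazen():
--             raise Exception('Stack Underflow')
--         return self.podatki.pop()
--
--     def vrh(self):
--         if self.prazen():
--             return None
--         return self.podatki[-1]
--
-- def naslednji_najmanjsi_el(tab):
--     '''
--         Funkcija s pomočjo sklada iz podanega seznama vrne seznam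
--         najbližjih in najmanjših elementov.
--     '''
--     if tab == [] or len(tab)==1:
--         return False
--
--     sklad = Sklad()
--     rez = []
--     # s for zanko pogledamo vse elemente v tabeli
--     for i in range(len(tab)-1, -1, -1): # desna -> leva
--         if sklad.prazen(): #če je sklad prazen, ni naslednjega min.
--             rez.append(0)
--             sklad.vstavi(tab[i]) #v sklad vstavimo el iz tabele
--         elif not sklad.prazen(): # v primeru, da sklad ni prazen
--             while(not sklad.prazen() and tab[i] < sklad.vrh()): # preverjamo el. v skladu dokler ga ne izpraznemo in
--                 # dokler so vrhnji el iz sklada večji od obravnavanega el.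
--                 #odstranjujemo vrhnje oz. večje elemente
--                 sklad.odstrani()
--             if sklad.prazen(): # če nismo našli manjšega
--                 rez.append(0)
--             else:
--                 rez.append(sklad.vrh()) # našli smo manjši el.
--             sklad.vstavi(tab[i])
--
--
--     return rez
--
-- def maxEl(tabela):
--     '''
--     Funkcija vrne največji element med abolutnimi razlikami iz dveh tabel.
--     '''
--     desni = naslednji_najmanjsi_el(tabela) #seznam desnih najmanjših el
--     tabD = desni[::-1]  #obreno tabelo rešitev, ker smo pregledovali el od desne->levi
--
--     #leve najmanjše el. dobimo enako kot desne, le da smo obrnili tabelo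
--     tabL = naslednji_najmanjsi_el(tabela[::-1]) #tabela levih najmanjših el
--
--     rezultat = []
--     for l,d in zip(tabL,tabD):  #absolutne razlike med el. iz dveh tab.
--         rezultat.append(abs(l-d))
--     return rezultat, max(rezultat)
-- ===== SOURCE B (Python) =====
-- def _first_le(x, xs):
--     """First element of xs that is <= x, else the 0 sentinel."""
--     for y in xs:
--         if y <= x:
--             return y
--     return 0
--
-- def maxEl(tabela):
--     """One left-to-right pass with a reversed-prefix list: for each element take
--     the nearest value <= it on the left and on the right by direct scan."""
--     rezultat = []
--     pre = []  # elements before the current one, nearest first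
--     for i, x in enumerate(tabela):
--         left = _first_le(x, pre)
--         right = _first_le(x, tabela[i + 1:])
--         rezultat.append(abs(left - right))
--         pre = [x] + pre
--     return rezultat, max(rezultat)
-- ===== Notes on version B (the rewrite author's own statement) =====
-- stated objective: simpler
-- what changed: Replaces the two right-to-left Sklad-stack passes (plus list reversals and zip) by one left-to-right pass that finds each element's nearest <= neighbour on either side by direct scan.
-- crash fix: On one-element lists A raises TypeError (its helper returns False which then gets sliced) while B returns ([0], 0). — e.g. on maxEl([5]): A raises TypeError, B returns ([0], 0)
import Mathlib
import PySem

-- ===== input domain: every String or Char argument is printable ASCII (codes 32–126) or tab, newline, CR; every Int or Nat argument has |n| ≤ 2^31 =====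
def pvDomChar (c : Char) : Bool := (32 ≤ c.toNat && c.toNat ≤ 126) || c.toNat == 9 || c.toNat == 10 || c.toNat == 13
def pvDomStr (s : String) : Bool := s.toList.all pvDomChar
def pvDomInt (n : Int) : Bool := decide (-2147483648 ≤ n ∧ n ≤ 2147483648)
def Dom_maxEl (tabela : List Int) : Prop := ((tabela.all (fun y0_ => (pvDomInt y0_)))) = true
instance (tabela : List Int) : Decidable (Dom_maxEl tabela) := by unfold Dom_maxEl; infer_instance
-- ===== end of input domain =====

-- B replaces A's two stack passes by one direct-scan pass (no speed claim); on
-- len < 2 A raises (TypeError), excluded by Pre_; equivalence is about the return value.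

-- ===== PORT A =====
-- the inner while loop: pop stack entries strictly greater than x (stack head = top)
def popLoop (x : Int) : List Int → List Int
  | [] => []
  | t :: ts => if x < t then popLoop x ts else t :: ts

-- one iteration of A's for-loop body over state (sklad, rez)
def stepA (st : List Int × List Int) (x : Int) : List Int × List Int :=
  if st.1.isEmpty then (x :: st.1, st.2 ++ [0])
  else
    let s' := popLoop x st.1
    if s'.isEmpty then (x :: s', st.2 ++ [0])
    else (x :: s', st.2 ++ [s'.headD 0])

-- 'for i in range(len(tab)-1, -1, -1)' reading tab[i] = fold over tab.reverse (same values, same order)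
def nnse (tab : List Int) : Option (List Int) :=
  if tab = [] ∨ tab.length = 1 then none   -- Python returns False here
  else some ((tab.reverse.foldl stepA ([], [])).2)

def maxEl (tabela : List Int) : List Int × Int :=
  match nnse tabela with
  | none => ([], 0)   -- Python raises TypeError here; excluded by Pre_maxEl
  | some desni =>
    let tabD := desni.reverse
    match nnse tabela.reverse with
    | none => ([], 0)  -- unreachable under Pre_maxEl
    | some tabL =>
      let rezultat := List.zipWith (fun l d => |l - d|) tabL tabD
      (rezultat, (PySem.List.max? rezultat (fun v => v)).getD 0)  -- max([]) cannot occur under Pre_maxEl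

-- ===== PORT B =====
-- first element ≤ x, else the 0 sentinel (Source B _first_le)
def firstLE (x : Int) : List Int → Int
  | [] => 0
  | y :: ys => if y ≤ x then y else firstLE x ys

-- Source B main loop: pre = reversed prefix, rest = tabela[i+1:]
def altLoop (pre : List Int) : List Int → List Int
  | [] => []
  | x :: rest => |firstLE x pre - firstLE x rest| :: altLoop (x :: pre) rest

def maxEl_alt (tabela : List Int) : List Int × Int :=
  let rezultat := altLoop [] tabela
  (rezultat, (PySem.List.max? rezultat (fun v => v)).getD 0)

-- ===== PRECONDITION & SPEC =====
-- Pre_ excludes lists of length < 2, on which A raises TypeError (False[::-1]).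
def Pre_maxEl (tabela : List Int) : Prop := 2 ≤ tabela.length
instance (tabela : List Int) : Decidable (Pre_maxEl tabela) := by unfold Pre_maxEl; infer_instance
def pvWitness_maxEl : List Int := [3, 1, 2]

-- On one-element lists A raises TypeError (its helper returns False which then gets sliced) while B returns ([0], 0).
def Raises_maxEl (tabela : List Int) : Prop := tabela.length = 1
instance (tabela : List Int) : Decidable (Raises_maxEl tabela) := by unfold Raises_maxEl; infer_instance
def pvRaiseWitness_maxEl : List Int := [5]
def pvRaiseWitnessOut_maxEl : List Int × Int := ([0], 0)

def Spec_maxEl (tabela : List Int) (out : List Int × Int) : Prop := out = maxEl_alt tabela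
instance (tabela : List Int) (out : List Int × Int) : Decidable (Spec_maxEl tabela out) := by unfold Spec_maxEl; infer_instance

-- ===== CLAIM (what is proved, stated in full; the proofs are below) =====
def Claim_equal_maxEl : Prop := ∀ (tabela : List Int), Dom_maxEl tabela → Pre_maxEl tabela → Spec_maxEl tabela (maxEl tabela)
def Claim_raises_maxEl : Prop := (∀ (tabela : List Int), Dom_maxEl tabela → Raises_maxEl tabela → ¬ Pre_maxEl tabela) ∧ (Dom_maxEl (pvRaiseWitness_maxEl) ∧ Raises_maxEl (pvRaiseWitness_maxEl) ∧ maxEl_alt (pvRaiseWitness_maxEl) = pvRaiseWitnessOut_maxEl)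

-- ===== LEMMAS AND PROOFS =====

-- the stack contents after processing a suffix (head = top)
def chain : List Int → List Int
  | [] => []
  | x :: r => x :: popLoop x (chain r)

-- abstract versions of A's folded state
def Sfun : List Int → List Int → List Int
  | [], s => s
  | x :: p, s => Sfun p (x :: popLoop x s)

def Rfun : List Int → List Int → List Int
  | [], _ => []
  | x :: p, s => firstLE x s :: Rfun p (x :: popLoop x s)

-- right-neighbour values with a base list appended after the input
def rightVals (base : List Int) : List Int → List Int
  | [] => []
  | x :: r => firstLE x (r ++ base) :: rightVals base r

theorem firstLE_popLoop (x y : Int) (s : List Int) (h : x < y) :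
    firstLE x (popLoop y s) = firstLE x s := by
  induction s with
  | nil => rfl
  | cons t ts ih =>
    simp only [popLoop]
    split_ifs with h1
    · rw [ih, firstLE, if_neg (by omega)]
    · rfl

theorem firstLE_chain (x : Int) (r : List Int) : firstLE x (chain r) = firstLE x r := by
  induction r with
  | nil => rfl
  | cons y ys ih =>
    simp only [chain, firstLE]
    split_ifs with h
    · rfl
    · rw [firstLE_popLoop x y _ (by omega), ih]

theorem firstLE_headD (x : Int) (s : List Int) : firstLE x s = (popLoop x s).headD 0 := by
  induction s with
  | nil => rfl
  | cons t ts ih =>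
    simp only [firstLE, popLoop]
    split_ifs with h h2
    · exact absurd h2 (by omega)
    · rfl
    · exact ih
    · exact absurd (show x < t by omega) ‹¬x < t›

theorem stepA_eq (s r : List Int) (x : Int) :
    stepA (s, r) x = (x :: popLoop x s, r ++ [firstLE x s]) := by
  cases s with
  | nil => simp [stepA, popLoop, firstLE]
  | cons t ts =>
    simp only [stepA, List.isEmpty_cons, Bool.false_eq_true, if_false]
    rw [firstLE_headD]
    cases h : popLoop x (t :: ts) with
    | nil => simp
    | cons a as => simp

theorem foldl_stepA (p s r : List Int) :
    p.foldl stepA (s, r) = (Sfun p s, r ++ Rfun p s) := by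
  induction p generalizing s r with
  | nil => simp [Sfun, Rfun]
  | cons x p ih =>
    simp only [List.foldl_cons, stepA_eq, Sfun, Rfun, ih]
    simp

theorem Sfun_append (l : List Int) (x : Int) (s : List Int) :
    Sfun (l ++ [x]) s = x :: popLoop x (Sfun l s) := by
  induction l generalizing s with
  | nil => rfl
  | cons y l ih => simp only [List.cons_append, Sfun, ih]

theorem Rfun_append (l : List Int) (x : Int) (s : List Int) :
    Rfun (l ++ [x]) s = Rfun l s ++ [firstLE x (Sfun l s)] := by
  induction l generalizing s with
  | nil => rfl
  | cons y l ih => simp only [List.cons_append, Rfun, Sfun, ih, List.cons_append]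

theorem Sfun_reverse (tab : List Int) : Sfun tab.reverse [] = chain tab := by
  induction tab with
  | nil => rfl
  | cons x r ih => simp only [List.reverse_cons, Sfun_append, ih, chain]

theorem Rfun_reverse (tab : List Int) : Rfun tab.reverse [] = (rightVals [] tab).reverse := by
  induction tab with
  | nil => rfl
  | cons x r ih =>
    simp only [List.reverse_cons, Rfun_append, ih, Sfun_reverse, rightVals, List.reverse_cons,
      firstLE_chain, List.append_nil]

theorem rightVals_append (base u : List Int) (x : Int) :
    rightVals base (u ++ [x]) = rightVals (x :: base) u ++ [firstLE x base] := by
  induction u with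
  | nil => simp [rightVals]
  | cons y u ih =>
    simp only [List.cons_append, rightVals, ih, List.append_assoc,
      List.nil_append, List.cons_append]

-- left-neighbour values, prefix carried reversed
def leftVals (pre : List Int) : List Int → List Int
  | [] => []
  | x :: r => firstLE x pre :: leftVals (x :: pre) r

theorem rightVals_reverse (l pre : List Int) :
    (rightVals pre l.reverse).reverse = leftVals pre l := by
  induction l generalizing pre with
  | nil => rfl
  | cons x r ih =>
    simp only [List.reverse_cons, rightVals_append, List.reverse_append, List.reverse_cons,
      List.reverse_nil, List.nil_append, List.singleton_append, ih, leftVals]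

theorem zip_altLoop (l pre : List Int) :
    List.zipWith (fun a d => |a - d|) (leftVals pre l) (rightVals [] l) = altLoop pre l := by
  induction l generalizing pre with
  | nil => rfl
  | cons x r ih =>
    simp only [leftVals, rightVals, List.append_nil, List.zipWith_cons_cons, ih, altLoop]

theorem nnse_some (tab : List Int) (h : 2 ≤ tab.length) :
    nnse tab = some ((rightVals [] tab).reverse) := by
  have h1 : ¬(tab = [] ∨ tab.length = 1) := by
    rintro (rfl | hl) <;> simp_all
  simp only [nnse, if_neg h1, foldl_stepA, Rfun_reverse, List.nil_append]

-- ===== VERDICT (by name: the statement is the Claim_ definition above) =====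
theorem maxEl_spec : Claim_equal_maxEl := by
  intro tab _ hpre
  show maxEl tab = maxEl_alt tab
  have h2 : 2 ≤ tab.length := hpre
  have h2r : 2 ≤ tab.reverse.length := by simpa using h2
  simp only [maxEl, nnse_some tab h2, nnse_some tab.reverse h2r, List.reverse_reverse,
    rightVals_reverse, zip_altLoop, maxEl_alt]

theorem maxEl_raises : Claim_raises_maxEl := by
  unfold Claim_raises_maxEl
  exact ⟨by intro t _ hr; unfold Raises_maxEl at hr; unfold Pre_maxEl; omega, by decide⟩

-- re-check of the crash-fix witness value, projected from maxEl_raises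
theorem pvRaiseWitnessOut_maxEl_ok : maxEl_alt pvRaiseWitness_maxEl = pvRaiseWitnessOut_maxEl := by
  have h := maxEl_raises
  unfold Claim_raises_maxEl at h
  exact h.2.2.2
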